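-- pv_equiv track=rewrite | github.com/chrisburr/include-what-costs | src/include_what_costs/layout/depth.py | compute_depths
-- ===== SOURCE A (Python) =====
-- from collections import deque
--
-- def compute_depths(
--     edges: dict[str, set[str]],
--     direct_includes: set[str],
-- ) -> tuple[dict[int, list[str]], dict[str, int]]:
--     """BFS shortest-path depth assignment.
--
--     Args:
--         edges: Adjacency list (parent -> children).
--         direct_includes: Headers directly included by root file (depth 1).
--
--     Returns:
--         headers_by_depth: depth -> list of headers at that depth.
--         header_to_depth: header -> its depth.
--     """
--     header_to_depth: dict[str, int] = {}
--     queue: deque[tuple[str, int]] = deque()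
--
--     # All direct includes start at depth 1
--     for header in direct_includes:
--         header_to_depth[header] = 1
--         queue.append((header, 1))
--
--     # BFS to compute true minimum depths
--     while queue:
--         node, depth = queue.popleft()
--         for child in edges.get(node, set()):
--             if child not in header_to_depth:
--                 header_to_depth[child] = depth + 1
--                 queue.append((child, depth + 1))
--
--     # Group headers by depth
--     headers_by_depth: dict[int, list[str]] = {}
--     for header, depth in header_to_depth.items():
--         if depth not in headers_by_depth:
--             headers_by_depth[depth] = []
--         headers_by_depth[depth].append(header)
--
--     # Sort headers alphabetically within each depth for consistent ordering
--     for depth in headers_by_depth: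
--         headers_by_depth[depth].sort()
--
--     return headers_by_depth, header_to_depth
-- ===== SOURCE B (Python) =====
-- def compute_depths(
--     edges: dict[str, set[str]],
--     direct_includes: set[str],
-- ) -> tuple[dict[int, list[str]], dict[str, int]]:
--     """Level-synchronous BFS: process whole frontiers, grouping and sorting inline."""
--     header_to_depth: dict[str, int] = {h: 1 for h in direct_includes}
--     headers_by_depth: dict[int, list[str]] = {}
--     current = list(direct_includes)
--     depth = 1
--     while current:
--         headers_by_depth[depth] = sorted(current)
--         nxt: list[str] = []
--         for node in current:
--             for child in edges.get(node, ()):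
--                 if child not in header_to_depth:
--                     header_to_depth[child] = depth + 1
--                     nxt.append(child)
--         current = nxt
--         depth += 1
--     return headers_by_depth, header_to_depth
-- ===== Notes on version B (the rewrite author's own statement) =====
-- stated objective: alternative
-- what changed: Replaced the per-node (node, depth) deque BFS plus separate grouping and sorting post-passes by a level-synchronous BFS that advances a whole frontier per iteration and records each level's group (already sorted) inline, so the tuple queue and both post-passes disappear.
import Mathlib
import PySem

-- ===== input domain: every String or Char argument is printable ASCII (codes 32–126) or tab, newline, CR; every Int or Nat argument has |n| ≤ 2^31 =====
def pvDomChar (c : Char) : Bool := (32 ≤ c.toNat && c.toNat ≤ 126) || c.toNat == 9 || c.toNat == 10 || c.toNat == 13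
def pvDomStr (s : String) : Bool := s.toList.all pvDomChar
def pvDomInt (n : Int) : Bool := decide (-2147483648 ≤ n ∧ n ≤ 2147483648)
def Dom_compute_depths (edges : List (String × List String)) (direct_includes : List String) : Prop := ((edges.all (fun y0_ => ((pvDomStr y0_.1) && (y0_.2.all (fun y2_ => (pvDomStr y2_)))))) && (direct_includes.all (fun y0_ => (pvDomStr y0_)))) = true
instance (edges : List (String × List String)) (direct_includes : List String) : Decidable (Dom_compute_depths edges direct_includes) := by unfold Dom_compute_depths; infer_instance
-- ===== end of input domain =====

-- ===== PORT A =====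
-- termination bookkeeping for the BFS while-loops (not part of either algorithm):
-- all children occurring in `edges`, and how many of them a depth dict does not contain yet
def pvUniv (edges : List (String × List String)) : List String :=
  ((edges.map (·.2)).flatten).dedup

def pvUndisc (edges : List (String × List String)) (d : PySem.Dict String Int) : Nat :=
  ((pvUniv edges).filter (fun u => ! d.contains u)).length

lemma pv_filter_insert {L : List String} {c : String} {d : PySem.Dict String Int} {v : Int}
    (hn : L.Nodup) (hc : c ∈ L) (h : d.contains c = false) :
    (L.filter (fun u => ! (d.insert c v).contains u)).length + 1
      = (L.filter (fun u => ! d.contains u)).length := by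
  induction L with
  | nil => cases hc
  | cons x t ih =>
    rcases List.nodup_cons.mp hn with ⟨hxt, hnt⟩
    cases hc with
    | head =>
      have hfil : List.filter (fun u => (!(u == c) && !(d.contains u))) t
          = List.filter (fun u => !(d.contains u)) t := by
        apply List.filter_congr
        intro u hu
        have hux : (u == c) = false := by
          simp only [beq_eq_false_iff_ne]; rintro rfl; exact hxt hu
        simp [hux]
      simp [PySem.Dict.contains_insert, h]
      rw [hfil]
    | tail _ hc =>
      have hxc : x ≠ c := by rintro rfl; exact hxt hc
      have hcx : ((d.insert c v).contains x) = d.contains x := by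
        simp [PySem.Dict.contains_insert, beq_eq_false_iff_ne, hxc]
      simp only [List.filter_cons, hcx]
      have := ih hnt hc
      cases hdx : d.contains x <;> simp <;> omega

lemma pvUndisc_insert {edges : List (String × List String)} {c : String}
    {d : PySem.Dict String Int} {v : Int} (hc : c ∈ pvUniv edges)
    (h : d.contains c = false) :
    pvUndisc edges (d.insert c v) + 1 = pvUndisc edges d :=
  pv_filter_insert (List.nodup_dedup _) hc h

-- children looked up in `edges` all lie in pvUniv
lemma pv_getD_mk_subset (edges : List (String × List String)) (n : String) :
    ∀ c ∈ (PySem.Dict.mk edges).getD n [], c ∈ pvUniv edges := by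
  intro c hc
  unfold PySem.Dict.getD PySem.Dict.get? at hc
  cases hfind : (PySem.Dict.mk edges).items.find? (fun p => p.1 == n) with
  | none => rw [hfind] at hc; simp at hc
  | some p =>
    rw [hfind] at hc
    simp only [Option.map_some, Option.getD_some] at hc
    have hmem : p ∈ edges := List.mem_of_find?_eq_some hfind
    unfold pvUniv
    rw [List.mem_dedup, List.mem_flatten]
    exact ⟨p.2, List.mem_map_of_mem hmem, hc⟩

def aChildStep (v : Int) (st : List (String × Int) × PySem.Dict String Int) (c : String) :
    List (String × Int) × PySem.Dict String Int :=
  if st.2.contains c then st else (st.1 ++ [(c, v)], st.2.insert c v)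

lemma aMeasure {edges : List (String × List String)} {v : Int} :
    ∀ (cs : List String), (∀ c ∈ cs, c ∈ pvUniv edges) →
    ∀ (q : List (String × Int)) (d : PySem.Dict String Int),
      (cs.foldl (aChildStep v) (q, d)).1.length + pvUndisc edges (cs.foldl (aChildStep v) (q, d)).2
        ≤ q.length + pvUndisc edges d := by
  intro cs
  induction cs with
  | nil => intro _ q d; simp
  | cons c t ih =>
    intro hsub q d
    simp only [List.foldl_cons, aChildStep]
    cases hdc : d.contains c with
    | true =>
      simp only [if_pos rfl]
      exact ih (fun x hx => hsub x (List.mem_cons_of_mem _ hx)) q d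
    | false =>
      simp only [hdc, Bool.false_eq_true, if_false, List.nil_append]
      have h1 := ih (fun x hx => hsub x (List.mem_cons_of_mem _ hx)) (q ++ [(c, v)]) (d.insert c v)
      have h2 := pvUndisc_insert (edges := edges) (v := v) (hsub c (List.mem_cons_self)) hdc
      simp only [List.length_append, List.length_cons, List.length_nil] at h1 ⊢
      omega

def bChildStep (v : Int) (st : PySem.Dict String Int × List String) (c : String) :
    PySem.Dict String Int × List String :=
  if st.1.contains c then st else (st.1.insert c v, st.2 ++ [c])

lemma bMeasure {edges : List (String × List String)} {v : Int} :
    ∀ (cs : List String), (∀ c ∈ cs, c ∈ pvUniv edges) →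
    ∀ (n : List String) (d : PySem.Dict String Int),
      (cs.foldl (bChildStep v) (d, n)).2.length + pvUndisc edges (cs.foldl (bChildStep v) (d, n)).1
        ≤ n.length + pvUndisc edges d := by
  intro cs
  induction cs with
  | nil => intro _ n d; simp
  | cons c t ih =>
    intro hsub n d
    simp only [List.foldl_cons, bChildStep]
    cases hdc : d.contains c with
    | true =>
      simp only [if_pos rfl]
      exact ih (fun x hx => hsub x (List.mem_cons_of_mem _ hx)) n d
    | false =>
      simp only [hdc, Bool.false_eq_true, if_false, List.nil_append]
      have h1 := ih (fun x hx => hsub x (List.mem_cons_of_mem _ hx)) (n ++ [c]) (d.insert c v)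
      have h2 := pvUndisc_insert (edges := edges) (v := v) (hsub c (List.mem_cons_self)) hdc
      simp only [List.length_append, List.length_cons, List.length_nil] at h1 ⊢
      omega

def aLoop (edges : List (String × List String)) :
    List (String × Int) → PySem.Dict String Int → PySem.Dict String Int
  | [], d => d
  | (node, depth) :: rest, d =>
    let st := ((PySem.Dict.mk edges).getD node []).foldl (aChildStep (depth + 1)) (rest, d)
    aLoop edges st.1 st.2
termination_by q d => q.length + pvUndisc edges d
decreasing_by
  have h := aMeasure (edges := edges) (v := depth + 1)
    ((PySem.Dict.mk edges).getD node []) (pv_getD_mk_subset edges node) rest d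
  simp only [List.length_cons]
  omega

def compute_depths (edges : List (String × List String)) (direct_includes : List String) :
    (List (Int × List String)) × (List (String × Int)) :=
  -- header_to_depth = {}; queue = deque(); for header in direct_includes: record depth 1, enqueue
  let init := direct_includes.foldl
    (fun (st : PySem.Dict String Int × List (String × Int)) h =>
      (st.1.insert h 1, st.2 ++ [(h, (1 : Int))]))
    (PySem.Dict.empty, [])
  -- while queue: pop, visit children
  let h2d := aLoop edges init.2 init.1
  -- group headers by depth
  let grouped := h2d.items.foldl
    (fun (g : PySem.Dict Int (List String)) p =>
      (if g.contains p.2 then g else g.insert p.2 []).modify p.2 [] (fun l => l ++ [p.1]))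
    PySem.Dict.empty
  -- sort each depth's list
  let sortedGroups := grouped.items.map (fun p => (p.1, PySem.List.sorted p.2 (fun x => x)))
  (sortedGroups, h2d.items)

-- ===== PORT B =====
def bLoop (edges : List (String × List String)) :
    List String → Int → PySem.Dict String Int → PySem.Dict Int (List String) →
    PySem.Dict Int (List String) × PySem.Dict String Int
  | current, depth, d, groups =>
    if hcur : current = [] then (groups, d)
    else
      let groups' := groups.insert depth (PySem.List.sorted current (fun x => x))
      let st := current.foldl
        (fun st node => ((PySem.Dict.mk edges).getD node []).foldl (bChildStep (depth + 1)) st)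
        (d, [])
      bLoop edges st.2 (depth + 1) st.1 groups'
termination_by current depth d groups => current.length + pvUndisc edges d
decreasing_by
  rw [← List.foldl_flatMap]
  have hatt : current.attach.flatMap (fun x => (PySem.Dict.mk edges).getD x.1 [])
      = current.flatMap (fun n => (PySem.Dict.mk edges).getD n []) := by
    simp [List.flatMap_def]
  rw [hatt]
  have h := bMeasure (edges := edges) (v := depth + 1)
    (current.flatMap (fun n => (PySem.Dict.mk edges).getD n []))
    (by
      intro c hc
      rcases List.mem_flatMap.mp hc with ⟨n, _, hcn⟩
      exact pv_getD_mk_subset edges n c hcn)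
    [] d
  have hlen : 0 < current.length := List.length_pos_of_ne_nil hcur
  simp only [List.length_nil] at h
  omega

def compute_depths_alt (edges : List (String × List String)) (direct_includes : List String) :
    (List (Int × List String)) × (List (String × Int)) :=
  -- header_to_depth = {h: 1 for h in direct_includes}
  let h2d0 := direct_includes.foldl
    (fun (d : PySem.Dict String Int) h => d.insert h 1) PySem.Dict.empty
  -- level-synchronous BFS, grouping (already sorted) inline
  let res := bLoop edges direct_includes 1 h2d0 PySem.Dict.empty
  (res.1.items, res.2.items)

-- ===== PRECONDITION & SPEC =====
-- Pre_ excludes duplicate entries in direct_includes: the argument is a Python set (its Lean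
-- encoding holds the distinct elements), so a list with duplicates encodes no valid input;
-- on such lists A's dict deduplicates while B's first frontier keeps the duplicates.
def Pre_compute_depths (edges : List (String × List String)) (direct_includes : List String) : Prop :=
  direct_includes.Nodup
instance (edges : List (String × List String)) (direct_includes : List String) : Decidable (Pre_compute_depths edges direct_includes) := by unfold Pre_compute_depths; infer_instance

def pvWitness_compute_depths : (List (String × List String)) × List String :=
  ([("a", ["b", "c"]), ("b", ["d"])], ["a", "x"])

def Spec_compute_depths (edges : List (String × List String)) (direct_includes : List String) (out : (List (Int × List String)) × (List (String × Int))) : Prop := out = compute_depths_alt edges direct_includes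
instance (edges : List (String × List String)) (direct_includes : List String) (out : (List (Int × List String)) × (List (String × Int))) : Decidable (Spec_compute_depths edges direct_includes out) := by unfold Spec_compute_depths; infer_instance

-- ===== CLAIM (what is proved, stated in full; the proofs are below) =====
def Claim_equal_compute_depths : Prop := ∀ (edges : List (String × List String)) (direct_includes : List String), Dom_compute_depths edges direct_includes → Pre_compute_depths edges direct_includes → Spec_compute_depths edges direct_includes (compute_depths edges direct_includes)

-- ===== LEMMAS AND PROOFS =====

-- rebase the inner child-fold of A: the queue prefix just rides along
lemma aShift (v : Int) :
    ∀ (cs : List String) (q : List (String × Int)) (d : PySem.Dict String Int),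
      cs.foldl (aChildStep v) (q, d)
        = (q ++ (cs.foldl (aChildStep v) ([], d)).1, (cs.foldl (aChildStep v) ([], d)).2) := by
  intro cs
  induction cs with
  | nil => intro q d; simp
  | cons c t ih =>
    intro q d
    simp only [List.foldl_cons, aChildStep]
    cases hdc : d.contains c with
    | true => simp only [if_pos rfl]; exact ih q d
    | false =>
      simp only [hdc, Bool.false_eq_true, if_false, List.nil_append]
      rw [ih (q ++ [(c, v)]), ih [(c, v)]]
      simp

-- rebase the inner child-fold of B: the nxt prefix just rides along
lemma bShift (v : Int) :
    ∀ (cs : List String) (n : List String) (d : PySem.Dict String Int),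
      cs.foldl (bChildStep v) (d, n)
        = ((cs.foldl (bChildStep v) (d, [])).1, n ++ (cs.foldl (bChildStep v) (d, [])).2) := by
  intro cs
  induction cs with
  | nil => intro n d; simp
  | cons c t ih =>
    intro n d
    simp only [List.foldl_cons, bChildStep]
    cases hdc : d.contains c with
    | true => simp only [if_pos rfl]; exact ih n d
    | false =>
      simp only [hdc, Bool.false_eq_true, if_false, List.nil_append]
      rw [ih (n ++ [c]), ih [c]]
      simp

-- A's child scan and B's child scan produce the same dict and mirrored pending entries
lemma pvMirror (v : Int) :
    ∀ (cs : List String) (d : PySem.Dict String Int),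
      cs.foldl (aChildStep v) ([], d)
        = (((cs.foldl (bChildStep v) (d, [])).2).map (fun c => (c, v)),
           (cs.foldl (bChildStep v) (d, [])).1) := by
  intro cs
  induction cs with
  | nil => intro d; simp
  | cons c t ih =>
    intro d
    simp only [List.foldl_cons, aChildStep, bChildStep]
    cases hdc : d.contains c with
    | true => simp only [if_pos rfl]; exact ih d
    | false =>
      simp only [hdc, Bool.false_eq_true, if_false, List.nil_append]
      rw [aShift v t [(c, v)], bShift v t [c], ih (d.insert c v)]
      simp

-- newly discovered children are appended, as items, at the end of the dict
lemma bItems (v : Int) :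
    ∀ (cs : List String) (d : PySem.Dict String Int),
      (cs.foldl (bChildStep v) (d, [])).1.items
        = d.items ++ ((cs.foldl (bChildStep v) (d, [])).2).map (fun c => (c, v)) := by
  intro cs
  induction cs with
  | nil => intro d; simp
  | cons c t ih =>
    intro d
    simp only [List.foldl_cons, bChildStep]
    cases hdc : d.contains c with
    | true => simp only [if_pos rfl]; exact ih d
    | false =>
      simp only [hdc, Bool.false_eq_true, if_false, List.nil_append]
      rw [bShift v t [c], ih (d.insert c v)]
      simp [PySem.Dict.items_insert_of_not_contains _ _ hdc]

-- processing one whole depth-d layer of A's queue equals B's level scan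
lemma pvLayer (edges : List (String × List String)) (d : Int) :
    ∀ (F : List String) (G : List (String × Int)) (D : PySem.Dict String Int),
      aLoop edges (F.map (fun h => (h, d)) ++ G) D
        = aLoop edges
            (G ++ (((F.flatMap (fun n => (PySem.Dict.mk edges).getD n [])).foldl
                      (bChildStep (d + 1)) (D, [])).2).map (fun c => (c, d + 1)))
            ((F.flatMap (fun n => (PySem.Dict.mk edges).getD n [])).foldl
               (bChildStep (d + 1)) (D, [])).1 := by
  intro F
  induction F with
  | nil => intro G D; simp
  | cons n F' ih =>
    intro G D
    simp only [List.map_cons, List.cons_append]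
    rw [aLoop]
    rw [aShift (d + 1) ((PySem.Dict.mk edges).getD n []) (F'.map (fun h => (h, d)) ++ G) D,
        pvMirror (d + 1)]
    set Y := ((PySem.Dict.mk edges).getD n []).foldl (bChildStep (d + 1)) (D, []) with hY
    rw [List.append_assoc]
    rw [ih (G ++ Y.2.map (fun c => (c, d + 1))) Y.1]
    have hflat : (n :: F').flatMap (fun n => (PySem.Dict.mk edges).getD n [])
        = (PySem.Dict.mk edges).getD n [] ++ F'.flatMap (fun n => (PySem.Dict.mk edges).getD n []) :=
      List.flatMap_cons ..
    rw [hflat, List.foldl_append]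
    rw [← hY, show Y = (Y.1, Y.2) from rfl,
        bShift (d + 1) (F'.flatMap (fun n => (PySem.Dict.mk edges).getD n [])) Y.2 Y.1]
    simp [List.append_assoc]

-- A's grouping step, named for the proofs
def pvGroupStep (g : PySem.Dict Int (List String)) (p : String × Int) :
    PySem.Dict Int (List String) :=
  (if g.contains p.2 then g else g.insert p.2 []).modify p.2 [] (fun l => l ++ [p.1])

lemma pvGroupAux (dp : Int) :
    ∀ (L : List String) (G : PySem.Dict Int (List String)) (acc : List String),
      (L.map (fun h => (h, dp))).foldl pvGroupStep (G.insert dp acc)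
        = G.insert dp (acc ++ L) := by
  intro L
  induction L with
  | nil => intro G acc; simp
  | cons h t ih =>
    intro G acc
    simp [List.map_cons, List.foldl_cons, pvGroupStep, PySem.Dict.contains_insert_self,
      PySem.Dict.modify, PySem.Dict.getD_insert_self, PySem.Dict.insert_insert_self]
    rw [ih G (acc ++ [h])]
    simp

lemma pvGroupBlock (dp : Int) (h : String) (t : List String)
    (G : PySem.Dict Int (List String)) (hG : G.contains dp = false) :
    (((h :: t).map (fun x => (x, dp))).foldl pvGroupStep G) = G.insert dp (h :: t) := by
  simp only [List.map_cons, List.foldl_cons, pvGroupStep, hG, Bool.false_eq_true, if_false,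
    PySem.Dict.modify, PySem.Dict.getD_insert_self, PySem.Dict.insert_insert_self,
    List.nil_append]
  rw [pvGroupAux dp t G [h]]
  simp

-- the heart: queue BFS (A) and level BFS (B) grow the same dict, and A's grouping
-- of the appended items reproduces B's inline groups
lemma pvMain (edges : List (String × List String)) :
    ∀ (N : Nat) (F : List String) (d : Int) (D : PySem.Dict String Int),
      F.length + pvUndisc edges D ≤ N →
      ∃ (RG : List (Int × List String)) (E : List (String × Int)),
        (∀ G, (bLoop edges F d D G).2 = aLoop edges (F.map (fun h => (h, d))) D) ∧
        (aLoop edges (F.map (fun h => (h, d))) D).items = D.items ++ E ∧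
        (∀ G : PySem.Dict Int (List String), (∀ k ∈ G.keys, k < d) →
          ((F.map (fun h => (h, d)) ++ E).foldl pvGroupStep G).items = G.items ++ RG ∧
          (bLoop edges F d D G).1.items
            = G.items ++ RG.map (fun p => (p.1, PySem.List.sorted p.2 (fun x => x)))) := by
  intro N
  induction N with
  | zero =>
    intro F d D hN
    have hF : F = [] := by
      cases F with
      | nil => rfl
      | cons a b => simp at hN
    subst hF
    exact ⟨[], [], by intro G; simp [bLoop, aLoop], by simp [aLoop],
      by intro G _; simp [bLoop]⟩
  | succ N ih =>
    intro F d D hN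
    cases hFc : F with
    | nil =>
      exact ⟨[], [], by intro G; simp [bLoop, aLoop], by simp [aLoop],
        by intro G _; simp [bLoop]⟩
    | cons n0 F' =>
      subst hFc
      set CS := (n0 :: F').flatMap (fun n => (PySem.Dict.mk edges).getD n []) with hCS
      set Z := CS.foldl (bChildStep (d + 1)) (D, []) with hZ
      have hCSU : ∀ c ∈ CS, c ∈ pvUniv edges := by
        intro c hc
        rcases List.mem_flatMap.mp hc with ⟨n, _, hcn⟩
        exact pv_getD_mk_subset edges n c hcn
      have hmeas : Z.2.length + pvUndisc edges Z.1 ≤ pvUndisc edges D := by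
        have := bMeasure (edges := edges) (v := d + 1) CS hCSU [] D
        simpa using this
      have hbl : ∀ G, bLoop edges (n0 :: F') d D G
          = bLoop edges Z.2 (d + 1) Z.1
              (G.insert d (PySem.List.sorted (n0 :: F') (fun x => x))) := by
        intro G
        rw [bLoop]
        simp only [reduceCtorEq, dif_neg, not_false_iff]
        rw [show (n0 :: F').foldl
              (fun st node => ((PySem.Dict.mk edges).getD node []).foldl (bChildStep (d + 1)) st)
              (D, []) = Z from (List.foldl_flatMap).symm]
      have hlayer : aLoop edges ((n0 :: F').map (fun h => (h, d))) D
          = aLoop edges (Z.2.map (fun c => (c, d + 1))) Z.1 := by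
        have h0 := pvLayer edges d (n0 :: F') [] D
        rw [List.append_nil, List.nil_append] at h0
        exact h0
      obtain ⟨RG₁, E₁, ihdict, ihitems, ihgp⟩ :=
        ih Z.2 (d + 1) Z.1 (by simp at hN; omega)
      refine ⟨(d, n0 :: F') :: RG₁, Z.2.map (fun c => (c, d + 1)) ++ E₁, ?_, ?_, ?_⟩
      · intro G
        rw [hbl G, ihdict, hlayer]
      · rw [hlayer, ihitems, bItems]
        simp [← hZ]
      · intro G hkeys
        have hGd : G.contains d = false := by
          cases hcd : G.contains d with
          | false => rfl
          | true =>
            exact absurd (hkeys d ((PySem.Dict.contains_iff_mem_keys G d).mp hcd)) (lt_irrefl d)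
        constructor
        · rw [show (n0 :: F').map (fun h => (h, d)) ++ (Z.2.map (fun c => (c, d + 1)) ++ E₁)
              = ((n0 :: F').map (fun h => (h, d))) ++ (Z.2.map (fun c => (c, d + 1)) ++ E₁) from rfl,
            List.foldl_append, pvGroupBlock d n0 F' G hGd]
          have hkeys' : ∀ k ∈ (G.insert d (n0 :: F')).keys, k < d + 1 := by
            intro k hk
            rcases (PySem.Dict.mem_keys_insert _ _ _ _).mp hk with rfl | hk
            · omega
            · have := hkeys k hk; omega
          rw [(ihgp (G.insert d (n0 :: F')) hkeys').1,
            PySem.Dict.items_insert_of_not_contains _ _ hGd]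
          simp
        · rw [hbl G]
          have hkeys'' : ∀ k ∈ (G.insert d (PySem.List.sorted (n0 :: F') (fun x => x))).keys,
              k < d + 1 := by
            intro k hk
            rcases (PySem.Dict.mem_keys_insert _ _ _ _).mp hk with rfl | hk
            · omega
            · have := hkeys k hk; omega
          rw [(ihgp _ hkeys'').2, PySem.Dict.items_insert_of_not_contains _ _ hGd]
          simp

-- A's init loop over distinct direct includes: dict items and queue are both the (·, 1) pairs
lemma pvInitA :
    ∀ (l : List String), l.Nodup →
    ∀ (D : PySem.Dict String Int) (q : List (String × Int)),
      (∀ h ∈ l, D.contains h = false) →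
      (l.foldl (fun (st : PySem.Dict String Int × List (String × Int)) h =>
          (st.1.insert h 1, st.2 ++ [(h, (1 : Int))])) (D, q)).1.items
        = D.items ++ l.map (fun h => (h, (1 : Int))) ∧
      (l.foldl (fun (st : PySem.Dict String Int × List (String × Int)) h =>
          (st.1.insert h 1, st.2 ++ [(h, (1 : Int))])) (D, q)).2
        = q ++ l.map (fun h => (h, (1 : Int))) := by
  intro l
  induction l with
  | nil => intro _ D q _; simp
  | cons h0 t ih =>
    intro hnd D q hfresh
    rcases List.nodup_cons.mp hnd with ⟨h0t, hndt⟩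
    have hfresh0 : D.contains h0 = false := hfresh h0 List.mem_cons_self
    have hfresh' : ∀ h ∈ t, (D.insert h0 1).contains h = false := by
      intro h ht
      have hne : (h == h0) = false := by
        simp only [beq_eq_false_iff_ne]; rintro rfl; exact h0t ht
      simp [PySem.Dict.contains_insert, hne, hfresh h (List.mem_cons_of_mem _ ht)]
    obtain ⟨ih1, ih2⟩ := ih hndt (D.insert h0 1) (q ++ [(h0, (1 : Int))]) hfresh'
    simp only [List.foldl_cons]
    refine ⟨?_, ?_⟩
    · rw [ih1, PySem.Dict.items_insert_of_not_contains _ _ hfresh0]; simp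
    · rw [ih2]; simp

-- B's init comprehension builds the same dict as A's init loop
lemma pvInitB :
    ∀ (l : List String) (D : PySem.Dict String Int) (q : List (String × Int)),
      l.foldl (fun (d : PySem.Dict String Int) h => d.insert h 1) D
        = (l.foldl (fun (st : PySem.Dict String Int × List (String × Int)) h =>
            (st.1.insert h 1, st.2 ++ [(h, (1 : Int))])) (D, q)).1 := by
  intro l
  induction l with
  | nil => intro D q; rfl
  | cons h0 t ih => intro D q; simp only [List.foldl_cons]; exact ih _ _

-- ===== VERDICT (by name: the statement is the Claim_ definition above) =====
theorem compute_depths_spec : Claim_equal_compute_depths := by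
  intro edges di _ hpre
  unfold Spec_compute_depths
  simp only [compute_depths, compute_depths_alt]
  have hfresh : ∀ h ∈ di, (PySem.Dict.empty : PySem.Dict String Int).contains h = false := by
    intro h _; simp
  obtain ⟨hD0, hQ0⟩ := pvInitA di hpre PySem.Dict.empty [] hfresh
  set init := di.foldl (fun (st : PySem.Dict String Int × List (String × Int)) h =>
      (st.1.insert h 1, st.2 ++ [(h, (1 : Int))])) (PySem.Dict.empty, []) with hinit
  simp only [show (PySem.Dict.empty : PySem.Dict String Int).items = [] from rfl,
    List.nil_append] at hD0
  obtain ⟨RG, E, hdict, hitems, hgp⟩ :=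
    pvMain edges (di.length + pvUndisc edges init.1) di 1 init.1 le_rfl
  have hq : init.2 = di.map (fun h => (h, (1 : Int))) := by simpa using hQ0
  have hstep : (fun (g : PySem.Dict Int (List String)) (p : String × Int) =>
      (if g.contains p.2 then g else g.insert p.2 []).modify p.2 [] (fun l => l ++ [p.1]))
      = pvGroupStep := rfl
  have hgp0 := hgp PySem.Dict.empty (by intro k hk; simp [PySem.Dict.keys_empty] at hk)
  have hB0 : di.foldl (fun (d : PySem.Dict String Int) h => d.insert h 1) PySem.Dict.empty
      = init.1 := pvInitB di PySem.Dict.empty []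
  rw [hq, hB0, hstep]
  have hAit : (aLoop edges (di.map (fun h => (h, (1 : Int)))) init.1).items
      = di.map (fun h => (h, (1 : Int))) ++ E := by
    rw [hitems, hD0]
  have h1 : List.map (fun p => (p.1, PySem.List.sorted p.2 fun x => x))
      (List.foldl pvGroupStep PySem.Dict.empty
        (aLoop edges (List.map (fun h => (h, (1 : Int))) di) init.1).items).items
      = (bLoop edges di 1 init.1 PySem.Dict.empty).1.items := by
    rw [hAit, hgp0.1, hgp0.2]
    simp [show (PySem.Dict.empty : PySem.Dict Int (List String)).items = [] from rfl]
  have h2 : (aLoop edges (List.map (fun h => (h, (1 : Int))) di) init.1).items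
      = (bLoop edges di 1 init.1 PySem.Dict.empty).2.items := by
    rw [hdict PySem.Dict.empty]
  exact Prod.ext h1 h2
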